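-- pv_equiv track=rewrite | github.com/ScripterOne/ArcadeCommander | Effects/layout.py | _build_default_adjacency
-- ===== SOURCE A (Python) =====
-- def _build_default_adjacency(groups: dict[str, list[str]]) -> dict[str, list[str]]:
--     adjacency: dict[str, set[str]] = {}
--     for names in groups.values():
--         for name in names:
--             adjacency.setdefault(name, set())
--
--     for g in ("P1_Action", "P2_Action"):
--         _add_action_connections(adjacency, groups.get(g, []))
--     for g in ("P1_Shoulder", "P2_Shoulder"):
--         _add_chain_connections(adjacency, groups.get(g, []))
--     for g in ("P1_System", "P2_System"):
--         _add_chain_connections(adjacency, groups.get(g, []))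
--
--     _connect_first(adjacency, groups.get("P1_System", []), groups.get("P1_Action", []))
--     _connect_first(adjacency, groups.get("P1_System", []), groups.get("P1_Shoulder", []))
--     _connect_first(adjacency, groups.get("P2_System", []), groups.get("P2_Action", []))
--     _connect_first(adjacency, groups.get("P2_System", []), groups.get("P2_Shoulder", []))
--     _connect_cross_systems(adjacency, groups.get("P1_System", []), groups.get("P2_System", []))
--
--     return {k: sorted(v) for k, v in adjacency.items()}
--
-- def _add_action_connections(adjacency: dict[str, set[str]], names: list[str]) -> None:
--     if len(names) < 2:
--         return
--     if len(names) >= 4: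
--         a, b, x, y = names[0], names[1], names[2], names[3]
--         for u, v in ((a, b), (a, x), (b, y), (x, y), (a, y), (b, x)):
--             _link(adjacency, u, v)
--         for i in range(4, len(names)):
--             _link(adjacency, names[i - 1], names[i])
--         return
--     _add_chain_connections(adjacency, names)
--
-- def _add_chain_connections(adjacency: dict[str, set[str]], names: list[str]) -> None:
--     for i in range(len(names) - 1):
--         _link(adjacency, names[i], names[i + 1])
--
-- def _connect_first(adjacency: dict[str, set[str]], left: list[str], right: list[str]) -> None:
--     if left and right:
--         _link(adjacency, left[0], right[0])
--
-- def _connect_cross_systems(adjacency: dict[str, set[str]], left: list[str], right: list[str]) -> None: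
--     if left and right:
--         _link(adjacency, left[0], right[0])
--
-- def _link(adjacency: dict[str, set[str]], a: str, b: str) -> None:
--     if a == b:
--         return
--     adjacency.setdefault(a, set()).add(b)
--     adjacency.setdefault(b, set()).add(a)
-- ===== SOURCE B (Python) =====
-- def _build_default_adjacency(groups: dict[str, list[str]]) -> dict[str, list[str]]:
--     def chain(names):
--         return list(zip(names, names[1:]))
--
--     def action(names):
--         if len(names) < 4:
--             return chain(names) if len(names) >= 2 else []
--         a, b, x, y = names[0], names[1], names[2], names[3]
--         return [(a, b), (a, x), (b, y), (x, y), (a, y), (b, x)] + list(zip(names[3:], names[4:]))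
--
--     edges = []
--     for g in ("P1_Action", "P2_Action"):
--         edges += action(groups.get(g, []))
--     for g in ("P1_Shoulder", "P2_Shoulder", "P1_System", "P2_System"):
--         edges += chain(groups.get(g, []))
--     p1s = groups.get("P1_System", [])
--     p2s = groups.get("P2_System", [])
--     for left, right in ((p1s, groups.get("P1_Action", [])),
--                         (p1s, groups.get("P1_Shoulder", [])),
--                         (p2s, groups.get("P2_Action", [])),
--                         (p2s, groups.get("P2_Shoulder", [])),
--                         (p1s, p2s)):
--         if left and right:
--             edges.append((left[0], right[0]))
--
--     sym = []
--     for a, b in edges: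
--         sym.append((a, b))
--         sym.append((b, a))
--
--     nodes = list(dict.fromkeys(n for names in groups.values() for n in names))
--     return {n: sorted({b for a, b in sym if a == n and a != b}) for n in nodes}
-- ===== Notes on version B (the rewrite author's own statement) =====
-- stated objective: alternative
-- what changed: A threads a mutable dict of sets through per-group linking helpers; B first materialises the whole undirected edge list (clique/chain/first-link rules) plus the ordered node list, then derives each node's sorted neighbour set by one scan over the symmetrised edges.
import Mathlib
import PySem

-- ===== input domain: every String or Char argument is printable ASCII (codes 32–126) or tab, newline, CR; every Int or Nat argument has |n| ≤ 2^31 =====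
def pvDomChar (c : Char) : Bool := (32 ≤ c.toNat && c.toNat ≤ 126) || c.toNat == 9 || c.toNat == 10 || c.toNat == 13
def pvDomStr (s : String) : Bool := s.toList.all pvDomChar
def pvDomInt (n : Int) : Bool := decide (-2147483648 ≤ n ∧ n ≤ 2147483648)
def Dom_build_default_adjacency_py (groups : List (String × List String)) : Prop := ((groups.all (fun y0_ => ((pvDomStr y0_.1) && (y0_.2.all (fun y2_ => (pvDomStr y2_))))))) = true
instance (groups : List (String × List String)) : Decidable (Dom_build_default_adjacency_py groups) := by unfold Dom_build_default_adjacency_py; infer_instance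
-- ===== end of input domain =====

-- B builds the flat undirected edge list and the node list first and then derives each
-- node's sorted neighbour set by scanning the symmetrised edges, instead of A's threading
-- of a mutable dict of sets through per-group linking helpers (objective: alternative).

-- ===== PORT A =====
-- groups.get(g, []) on the association list (first match, per the dict convention)
def pvGetG (groups : List (String × List String)) (g : String) : List String :=
  ((groups.find? (fun p => p.1 == g)).map (fun p => p.2)).getD []

-- _link
def pvLinkA (d : PySem.Dict String (PySem.Set String)) (a b : String) :
    PySem.Dict String (PySem.Set String) :=
  if a == b then d
  else ((d.modify a PySem.Set.empty (fun s => PySem.Set.add s b)).modify b PySem.Set.empty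
          (fun s => PySem.Set.add s a))

-- _add_chain_connections
def pvChainA (d : PySem.Dict String (PySem.Set String)) (names : List String) :
    PySem.Dict String (PySem.Set String) :=
  (PySem.List.pyRange 0 ((names.length : Int) - 1)).foldl
    (fun d i => pvLinkA d (PySem.List.pyGetD names i "") (PySem.List.pyGetD names (i + 1) "")) d

-- _add_action_connections
def pvActionA (d : PySem.Dict String (PySem.Set String)) (names : List String) :
    PySem.Dict String (PySem.Set String) :=
  if names.length < 2 then d
  else if 4 ≤ names.length then
    let a := PySem.List.pyGetD names 0 ""
    let b := PySem.List.pyGetD names 1 ""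
    let x := PySem.List.pyGetD names 2 ""
    let y := PySem.List.pyGetD names 3 ""
    let d := [(a, b), (a, x), (b, y), (x, y), (a, y), (b, x)].foldl
      (fun d e => pvLinkA d e.1 e.2) d
    (PySem.List.pyRange 4 (names.length : Int)).foldl
      (fun d i => pvLinkA d (PySem.List.pyGetD names (i - 1) "") (PySem.List.pyGetD names i "")) d
  else pvChainA d names

-- _connect_first
def pvFirstA (d : PySem.Dict String (PySem.Set String)) (left right : List String) :
    PySem.Dict String (PySem.Set String) :=
  match left, right with
  | l :: _, r :: _ => pvLinkA d l r
  | _, _ => d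

-- _connect_cross_systems (identical body in the Python source)
def pvCrossA (d : PySem.Dict String (PySem.Set String)) (left right : List String) :
    PySem.Dict String (PySem.Set String) :=
  match left, right with
  | l :: _, r :: _ => pvLinkA d l r
  | _, _ => d

def build_default_adjacency_py (groups : List (String × List String)) :
    List (String × List String) :=
  let adjacency : PySem.Dict String (PySem.Set String) :=
    groups.foldl (fun d p => p.2.foldl (fun d name => d.setdefault name PySem.Set.empty) d)
      PySem.Dict.empty
  let adjacency := ["P1_Action", "P2_Action"].foldl
    (fun d g => pvActionA d (pvGetG groups g)) adjacency
  let adjacency := ["P1_Shoulder", "P2_Shoulder"].foldl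
    (fun d g => pvChainA d (pvGetG groups g)) adjacency
  let adjacency := ["P1_System", "P2_System"].foldl
    (fun d g => pvChainA d (pvGetG groups g)) adjacency
  let adjacency := pvFirstA adjacency (pvGetG groups "P1_System") (pvGetG groups "P1_Action")
  let adjacency := pvFirstA adjacency (pvGetG groups "P1_System") (pvGetG groups "P1_Shoulder")
  let adjacency := pvFirstA adjacency (pvGetG groups "P2_System") (pvGetG groups "P2_Action")
  let adjacency := pvFirstA adjacency (pvGetG groups "P2_System") (pvGetG groups "P2_Shoulder")
  let adjacency := pvCrossA adjacency (pvGetG groups "P1_System") (pvGetG groups "P2_System")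
  adjacency.items.map (fun p => (p.1, PySem.List.sorted p.2 (fun s => s)))

-- ===== PORT B =====
def pvChainB (names : List String) : List (String × String) :=
  names.zip names.tail

def pvActionB (names : List String) : List (String × String) :=
  if names.length < 4 then
    (if 2 ≤ names.length then pvChainB names else [])
  else
    let a := names.getD 0 ""
    let b := names.getD 1 ""
    let x := names.getD 2 ""
    let y := names.getD 3 ""
    [(a, b), (a, x), (b, y), (x, y), (a, y), (b, x)] ++ (names.drop 3).zip (names.drop 4)

def pvEdgesB (groups : List (String × List String)) : List (String × String) :=
  let es := ["P1_Action", "P2_Action"].foldl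
    (fun es g => es ++ pvActionB (pvGetG groups g)) []
  let es := ["P1_Shoulder", "P2_Shoulder", "P1_System", "P2_System"].foldl
    (fun es g => es ++ pvChainB (pvGetG groups g)) es
  let p1s := pvGetG groups "P1_System"
  let p2s := pvGetG groups "P2_System"
  [(p1s, pvGetG groups "P1_Action"), (p1s, pvGetG groups "P1_Shoulder"),
   (p2s, pvGetG groups "P2_Action"), (p2s, pvGetG groups "P2_Shoulder"), (p1s, p2s)].foldl
    (fun es pr =>
      match pr.1, pr.2 with
      | l :: _, r :: _ => es ++ [(l, r)]
      | _, _ => es) es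

def build_default_adjacency_py_alt (groups : List (String × List String)) :
    List (String × List String) :=
  let edges := pvEdgesB groups
  let sym := edges.foldl (fun acc e => acc ++ [(e.1, e.2), (e.2, e.1)]) []
  let nodes := PySem.List.dedup (groups.flatMap (fun p => p.2))
  nodes.map (fun n =>
    (n, PySem.List.sorted
          (PySem.Set.ofList ((sym.filter (fun e => e.1 == n && !(e.1 == e.2))).map (fun e => e.2)))
          (fun s => s)))

-- ===== PRECONDITION & SPEC =====
def Spec_build_default_adjacency_py (groups : List (String × List String)) (out : List (String × List String)) : Prop := out = build_default_adjacency_py_alt groups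
instance (groups : List (String × List String)) (out : List (String × List String)) : Decidable (Spec_build_default_adjacency_py groups out) := by unfold Spec_build_default_adjacency_py; infer_instance

-- ===== CLAIM (what is proved, stated in full; the proofs are below) =====
def Claim_equal_build_default_adjacency_py : Prop := ∀ (groups : List (String × List String)), Dom_build_default_adjacency_py groups → Spec_build_default_adjacency_py groups (build_default_adjacency_py groups)

-- ===== LEMMAS AND PROOFS =====

-- proof-only helpers
def pvStep (d : PySem.Dict String (PySem.Set String)) (e : String × String) :
    PySem.Dict String (PySem.Set String) := pvLinkA d e.1 e.2

def pvSym (E : List (String × String)) : List (String × String) :=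
  E.flatMap (fun e => [(e.1, e.2), (e.2, e.1)])

def pvNbrs (E : List (String × String)) (n : String) : List String :=
  ((pvSym E).filter (fun e => e.1 == n && !(e.1 == e.2))).map (fun e => e.2)

def pvFlat (groups : List (String × List String)) : List String :=
  groups.flatMap (fun p => p.2)

def pvSeed (groups : List (String × List String)) : PySem.Dict String (PySem.Set String) :=
  groups.foldl (fun d p => p.2.foldl (fun d name => d.setdefault name PySem.Set.empty) d)
    PySem.Dict.empty

def pvFirstEdge (l r : List String) : List (String × String) :=
  match l, r with
  | a :: _, b :: _ => [(a, b)]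
  | _, _ => []

lemma pvNbrs_cons (e : String × String) (E : List (String × String)) (n : String) :
    pvNbrs (e :: E) n = pvNbrs [e] n ++ pvNbrs E n := by
  simp only [pvNbrs, pvSym, List.flatMap_cons, List.flatMap_nil, List.append_nil,
    List.cons_append, List.nil_append]
  rw [show (e.1, e.2) :: (e.2, e.1) :: List.flatMap (fun e => [(e.1, e.2), (e.2, e.1)]) E
      = [(e.1, e.2), (e.2, e.1)] ++ List.flatMap (fun e => [(e.1, e.2), (e.2, e.1)]) E from rfl,
    List.filter_append, List.map_append]

lemma pvSet_update_append (s : PySem.Set String) (l1 l2 : List String) :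
    PySem.Set.update s (l1 ++ l2) = PySem.Set.update (PySem.Set.update s l1) l2 := by
  simp [PySem.Set.update, List.foldl_append]

lemma pvSet_update_empty (l : List String) :
    PySem.Set.update PySem.Set.empty l = PySem.Set.ofList l := by
  rw [PySem.Set.ofList_eq_foldl]; rfl

lemma pvLink_getD (d : PySem.Dict String (PySem.Set String)) (a b n : String) :
    (pvLinkA d a b).getD n PySem.Set.empty
      = PySem.Set.update (d.getD n PySem.Set.empty) (pvNbrs [(a, b)] n) := by
  by_cases hab : a = b
  · subst hab
    simp [pvLinkA, pvNbrs, pvSym, PySem.Set.update]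
  · have h1 : (a == b) = false := by simp [hab]
    have h2 : (b == a) = false := by simp [Ne.symm hab]
    unfold pvLinkA
    rw [if_neg (by simp [hab] : ¬ ((a == b) = true))]
    simp only [PySem.Dict.getD_modify]
    by_cases hnb : n = b
    · have hba : ¬ b = a := fun h => hab h.symm
      simp [hnb, hba, pvNbrs, pvSym, PySem.Set.update, h1, h2]
    · by_cases hna : n = a
      · simp [hna, pvNbrs, pvSym, PySem.Set.update, h1, h2, show ¬ a = b from hab]
      · have h3 : (a == n) = false := by
          rw [beq_eq_false_iff_ne]; exact fun h => hna h.symm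
        have h4 : (b == n) = false := by
          rw [beq_eq_false_iff_ne]; exact fun h => hnb h.symm
        simp [hnb, hna, pvNbrs, pvSym, PySem.Set.update, h3, h4]

lemma pvFold_getD (E : List (String × String)) (d : PySem.Dict String (PySem.Set String))
    (n : String) :
    (E.foldl pvStep d).getD n PySem.Set.empty
      = PySem.Set.update (d.getD n PySem.Set.empty) (pvNbrs E n) := by
  induction E generalizing d with
  | nil => simp [pvNbrs, pvSym, PySem.Set.update]
  | cons e E ih =>
    rw [List.foldl_cons, ih, pvNbrs_cons, pvSet_update_append]
    congr 1
    simpa [pvStep] using pvLink_getD d e.1 e.2 n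

lemma pvStep_contains (d : PySem.Dict String (PySem.Set String)) (e : String × String)
    (x : String) (h : d.contains x = true) : (pvStep d e).contains x = true := by
  unfold pvStep pvLinkA
  split
  · exact h
  · simp [PySem.Dict.contains_modify, h]

lemma pvFold_keys (E : List (String × String)) (d : PySem.Dict String (PySem.Set String))
    (h : ∀ e ∈ E, d.contains e.1 = true ∧ d.contains e.2 = true) :
    (E.foldl pvStep d).keys = d.keys := by
  induction E generalizing d with
  | nil => rfl
  | cons e E ih =>
    have he := h e (List.mem_cons_self ..)
    have hk : (pvStep d e).keys = d.keys := by
      unfold pvStep pvLinkA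
      split
      · rfl
      · rw [PySem.Dict.keys_modify, PySem.Dict.keys_insert_of_contains _ _
          (by simp [PySem.Dict.contains_modify, he.2]),
          PySem.Dict.keys_modify, PySem.Dict.keys_insert_of_contains _ _ he.1]
    rw [List.foldl_cons, ih (pvStep d e)
      (fun e' he' => ⟨pvStep_contains _ _ _ (h e' (List.mem_cons_of_mem _ he')).1,
        pvStep_contains _ _ _ (h e' (List.mem_cons_of_mem _ he')).2⟩), hk]

lemma pvSeed_eq_flat (groups : List (String × List String)) :
    pvSeed groups
      = (pvFlat groups).foldl (fun d name => d.setdefault name PySem.Set.empty)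
          PySem.Dict.empty := by
  unfold pvSeed pvFlat
  rw [List.flatMap_def, List.foldl_flatten, List.foldl_map]

lemma pvSetdefault_fold_keys (l : List String) (d : PySem.Dict String (PySem.Set String)) :
    (l.foldl (fun d name => d.setdefault name PySem.Set.empty) d).keys
      = PySem.Set.update d.keys l := by
  induction l generalizing d with
  | nil => rfl
  | cons x l ih =>
    rw [List.foldl_cons, ih]
    have hstep : (d.setdefault x PySem.Set.empty).keys = PySem.Set.add d.keys x := by
      rw [PySem.Dict.keys_setdefault]
      by_cases h : d.contains x = true
      · have hx : x ∈ d.keys := (PySem.Dict.contains_iff_mem_keys d x).mp h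
        simp [h, PySem.Set.add, PySem.Set.contains, hx]
      · have hx : x ∉ d.keys := fun hm => h ((PySem.Dict.contains_iff_mem_keys d x).mpr hm)
        simp [h, PySem.Set.add, PySem.Set.contains, hx]
    rw [hstep]
    rfl

lemma pvSetdefault_fold_getD (l : List String) (d : PySem.Dict String (PySem.Set String))
    (n : String) :
    (l.foldl (fun d name => d.setdefault name PySem.Set.empty) d).getD n PySem.Set.empty
      = d.getD n PySem.Set.empty := by
  induction l generalizing d with
  | nil => rfl
  | cons x l ih =>
    rw [List.foldl_cons, ih]
    rcases eq_or_ne n x with rfl | hne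
    · exact PySem.Dict.getD_setdefault_self d n _ _
    · rw [PySem.Dict.getD_eq_get?_getD, PySem.Dict.get?_setdefault_of_ne _ _ hne,
        ← PySem.Dict.getD_eq_get?_getD]

lemma pvSeed_keys (groups : List (String × List String)) :
    (pvSeed groups).keys = PySem.Set.ofList (pvFlat groups) := by
  rw [pvSeed_eq_flat, pvSetdefault_fold_keys, PySem.Dict.keys_empty, ← pvSet_update_empty]
  rfl

lemma pvSeed_getD (groups : List (String × List String)) (n : String) :
    (pvSeed groups).getD n PySem.Set.empty = PySem.Set.empty := by
  rw [pvSeed_eq_flat, pvSetdefault_fold_getD, PySem.Dict.getD_empty]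

lemma pvGetG_mem (groups : List (String × List String)) (g x : String)
    (h : x ∈ pvGetG groups g) : x ∈ pvFlat groups := by
  unfold pvGetG at h
  unfold pvFlat
  cases hf : groups.find? (fun p => p.1 == g) with
  | none => rw [hf] at h; simp at h
  | some p =>
    rw [hf] at h
    simp only [Option.map_some, Option.getD_some] at h
    exact List.mem_flatMap.mpr ⟨p, List.mem_of_find?_eq_some hf, h⟩

lemma pvChainB_mem (names : List String) (e : String × String) (h : e ∈ pvChainB names) :
    e.1 ∈ names ∧ e.2 ∈ names := by
  obtain ⟨a, b⟩ := e
  obtain ⟨h1, h2⟩ := List.of_mem_zip h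
  exact ⟨h1, List.mem_of_mem_tail h2⟩

lemma pvGetD_mem (names : List String) (i : Nat) (hi : i < names.length) :
    names.getD i "" ∈ names := by
  rw [List.getD_eq_getElem _ _ hi]
  exact List.getElem_mem _

lemma pvActionB_mem (names : List String) (e : String × String) (h : e ∈ pvActionB names) :
    e.1 ∈ names ∧ e.2 ∈ names := by
  unfold pvActionB at h
  split at h
  · split at h
    · exact pvChainB_mem _ _ h
    · simp at h
  · rename_i h4
    have h4' : 4 ≤ names.length := by omega
    obtain ⟨a, b⟩ := e
    simp only [List.cons_append, List.nil_append, List.mem_cons, Prod.mk.injEq] at h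
    rcases h with ⟨rfl, rfl⟩ | ⟨rfl, rfl⟩ | ⟨rfl, rfl⟩ | ⟨rfl, rfl⟩ | ⟨rfl, rfl⟩ | ⟨rfl, rfl⟩ | h
    · exact ⟨pvGetD_mem _ 0 (by omega), pvGetD_mem _ 1 (by omega)⟩
    · exact ⟨pvGetD_mem _ 0 (by omega), pvGetD_mem _ 2 (by omega)⟩
    · exact ⟨pvGetD_mem _ 1 (by omega), pvGetD_mem _ 3 (by omega)⟩
    · exact ⟨pvGetD_mem _ 2 (by omega), pvGetD_mem _ 3 (by omega)⟩
    · exact ⟨pvGetD_mem _ 0 (by omega), pvGetD_mem _ 3 (by omega)⟩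
    · exact ⟨pvGetD_mem _ 1 (by omega), pvGetD_mem _ 2 (by omega)⟩
    · obtain ⟨h1, h2⟩ := List.of_mem_zip h
      exact ⟨List.mem_of_mem_drop h1, List.mem_of_mem_drop h2⟩

lemma pvFirstEdge_mem (l r : List String) (e : String × String) (h : e ∈ pvFirstEdge l r) :
    e.1 ∈ l ∧ e.2 ∈ r := by
  obtain ⟨a, b⟩ := e
  cases l <;> cases r <;> simp_all [pvFirstEdge]

lemma pvEdgesB_eq (groups : List (String × List String)) :
    pvEdgesB groups
      = pvActionB (pvGetG groups "P1_Action") ++ pvActionB (pvGetG groups "P2_Action")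
        ++ pvChainB (pvGetG groups "P1_Shoulder") ++ pvChainB (pvGetG groups "P2_Shoulder")
        ++ pvChainB (pvGetG groups "P1_System") ++ pvChainB (pvGetG groups "P2_System")
        ++ pvFirstEdge (pvGetG groups "P1_System") (pvGetG groups "P1_Action")
        ++ pvFirstEdge (pvGetG groups "P1_System") (pvGetG groups "P1_Shoulder")
        ++ pvFirstEdge (pvGetG groups "P2_System") (pvGetG groups "P2_Action")
        ++ pvFirstEdge (pvGetG groups "P2_System") (pvGetG groups "P2_Shoulder")
        ++ pvFirstEdge (pvGetG groups "P1_System") (pvGetG groups "P2_System") := by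
  unfold pvEdgesB
  simp only [List.foldl_cons, List.foldl_nil, List.nil_append]
  cases h1 : pvGetG groups "P1_System" <;> cases h2 : pvGetG groups "P2_System" <;>
    cases h3 : pvGetG groups "P1_Action" <;> cases h4 : pvGetG groups "P1_Shoulder" <;>
    cases h5 : pvGetG groups "P2_Action" <;> cases h6 : pvGetG groups "P2_Shoulder" <;>
    simp [pvFirstEdge, List.append_assoc]

lemma pvEdgesB_mem (groups : List (String × List String)) (e : String × String)
    (h : e ∈ pvEdgesB groups) : e.1 ∈ pvFlat groups ∧ e.2 ∈ pvFlat groups := by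
  rw [pvEdgesB_eq] at h
  simp only [List.mem_append] at h
  rcases h with ((((((((((h | h) | h) | h) | h) | h) | h) | h) | h) | h) | h) <;>
    first
    | exact ⟨pvGetG_mem _ _ _ (pvActionB_mem _ _ h).1, pvGetG_mem _ _ _ (pvActionB_mem _ _ h).2⟩
    | exact ⟨pvGetG_mem _ _ _ (pvChainB_mem _ _ h).1, pvGetG_mem _ _ _ (pvChainB_mem _ _ h).2⟩
    | exact ⟨pvGetG_mem _ _ _ (pvFirstEdge_mem _ _ _ h).1,
        pvGetG_mem _ _ _ (pvFirstEdge_mem _ _ _ h).2⟩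

lemma pvZip_adj_eq (x : String) (t : List String) :
    (x :: t).zip (x :: t).tail
      = (List.range t.length).map (fun i : Nat =>
          (PySem.List.pyGetD (x :: t) ((i : Int)) "",
           PySem.List.pyGetD (x :: t) ((i : Int) + 1) "")) := by
  apply List.ext_getElem
  · simp only [List.length_zip, List.length_map, List.length_range, List.length_cons,
      List.tail_cons]
    omega
  · intro i h1 h2
    have hi : i < t.length := by simpa using h2
    have c2 : ((i : Int) + 1) = (((i + 1 : Nat)) : Int) := by push_cast; ring
    simp only [List.getElem_map, List.getElem_range, List.getElem_zip, List.getElem_tail]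
    rw [c2, PySem.List.pyGetD_natCast, PySem.List.pyGetD_natCast,
      List.getD_eq_getElem _ _ (by simp; omega), List.getD_eq_getElem _ _ (by simp; omega)]

lemma pvChainA_eq (d : PySem.Dict String (PySem.Set String)) (names : List String) :
    pvChainA d names = (pvChainB names).foldl pvStep d := by
  cases names with
  | nil =>
    unfold pvChainA pvChainB
    norm_num
  | cons x t =>
    have hlen : (((x :: t).length : Int)) - 1 = ((t.length : Nat) : Int) := by
      simp
    unfold pvChainA pvChainB
    rw [hlen, PySem.List.pyRange_zero_natCast, List.foldl_map, pvZip_adj_eq, List.foldl_map]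
    simp [pvStep]

lemma pvTail_zip_eq (names : List String) (h4 : 4 ≤ names.length) :
    (names.drop 3).zip (names.drop 4)
      = (List.range (names.length - 4)).map (fun k : Nat =>
          (PySem.List.pyGetD names ((4 : Int) + 1 * (k : Int) - 1) "",
           PySem.List.pyGetD names ((4 : Int) + 1 * (k : Int)) "")) := by
  apply List.ext_getElem
  · simp only [List.length_zip, List.length_map, List.length_range, List.length_drop]
    omega
  · intro i h1 h2
    have hi : i < names.length - 4 := by simpa using h2
    have c1 : ((4 : Int) + 1 * (i : Int) - 1) = (((3 + i : Nat)) : Int) := by push_cast; ring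
    have c2 : ((4 : Int) + 1 * (i : Int)) = (((4 + i : Nat)) : Int) := by push_cast; ring
    simp only [List.getElem_map, List.getElem_range, List.getElem_zip, List.getElem_drop]
    rw [c1, c2, PySem.List.pyGetD_natCast, PySem.List.pyGetD_natCast,
      List.getD_eq_getElem _ _ (by omega), List.getD_eq_getElem _ _ (by omega)]

lemma pvActionA_eq (d : PySem.Dict String (PySem.Set String)) (names : List String) :
    pvActionA d names = (pvActionB names).foldl pvStep d := by
  by_cases h2 : names.length < 2
  · unfold pvActionA pvActionB
    rw [if_pos h2, if_pos (by omega), if_neg (by omega)]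
    rfl
  · by_cases h4 : 4 ≤ names.length
    · unfold pvActionA pvActionB
      rw [if_neg h2, if_pos h4, if_neg (by omega)]
      simp only [List.foldl_append, List.foldl_cons, List.foldl_nil]
      have hr : PySem.List.pyRange 4 ((names.length : Int))
          = (List.range (names.length - 4)).map (fun k : Nat => (4 : Int) + 1 * (k : Int)) := by
        rw [PySem.List.pyRange_of_pos 4 ((names.length : Int)) (by norm_num : (0 : Int) < 1)]
        have h5 : ((names.length : Int) - 4 + 1 - 1) = ((names.length : Int)) - 4 := by ring
        rw [h5, Int.ediv_one]
        have h6 : (if (4 : Int) < (names.length : Int)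
            then ((names.length : Int) - 4).toNat else 0) = names.length - 4 := by
          split <;> omega
        rw [h6]
      rw [hr, List.foldl_map, pvTail_zip_eq names h4, List.foldl_map]
      simp [pvStep, PySem.List.pyGetD_ofNat']
    · unfold pvActionA pvActionB
      rw [if_neg h2, if_neg h4, if_pos (by omega), if_pos (by omega)]
      exact pvChainA_eq d names

lemma pvFirstA_eq (d : PySem.Dict String (PySem.Set String)) (l r : List String) :
    pvFirstA d l r = (pvFirstEdge l r).foldl pvStep d := by
  cases l <;> cases r <;> simp [pvFirstA, pvFirstEdge, pvStep]

lemma pvCrossA_eq (d : PySem.Dict String (PySem.Set String)) (l r : List String) :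
    pvCrossA d l r = (pvFirstEdge l r).foldl pvStep d := by
  cases l <;> cases r <;> simp [pvCrossA, pvFirstEdge, pvStep]

lemma pvA_dict_eq (groups : List (String × List String)) :
    build_default_adjacency_py groups
      = ((pvEdgesB groups).foldl pvStep (pvSeed groups)).items.map
          (fun p => (p.1, PySem.List.sorted p.2 (fun s => s))) := by
  unfold build_default_adjacency_py
  rw [pvEdgesB_eq]
  simp only [List.foldl_cons, List.foldl_nil, List.foldl_append]
  rw [pvActionA_eq, pvActionA_eq, pvChainA_eq, pvChainA_eq, pvChainA_eq, pvChainA_eq,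
    pvFirstA_eq, pvFirstA_eq, pvFirstA_eq, pvFirstA_eq, pvCrossA_eq]
  rfl

lemma pvB_eq (groups : List (String × List String)) :
    build_default_adjacency_py_alt groups
      = (PySem.Set.ofList (pvFlat groups)).map
          (fun n => (n, PySem.List.sorted (PySem.Set.ofList (pvNbrs (pvEdgesB groups) n))
            (fun s => s))) := by
  unfold build_default_adjacency_py_alt
  simp only [PySem.List.foldl_append_eq_flatMap, PySem.List.dedup_eq_ofList, List.nil_append]
  rfl

-- ===== VERDICT (by name: the statement is the Claim_ definition above) =====
theorem build_default_adjacency_py_spec : Claim_equal_build_default_adjacency_py := by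
  intro groups _
  unfold Spec_build_default_adjacency_py
  rw [pvA_dict_eq, pvB_eq]
  have hkeys : ((pvEdgesB groups).foldl pvStep (pvSeed groups)).keys
      = PySem.Set.ofList (pvFlat groups) := by
    rw [pvFold_keys _ _ (fun e he => by
      have hm := pvEdgesB_mem groups e he
      constructor <;> rw [PySem.Dict.contains_iff_mem_keys, pvSeed_keys, PySem.Set.mem_ofList]
      · exact hm.1
      · exact hm.2), pvSeed_keys]
  have hnodup : ((pvEdgesB groups).foldl pvStep (pvSeed groups)).keys.Nodup := by
    rw [hkeys]; exact PySem.Set.nodup_ofList _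
  rw [PySem.Dict.items_eq_map_keys _ hnodup PySem.Set.empty, List.map_map, hkeys]
  apply List.map_congr_left
  intro n _
  simp only [Function.comp]
  rw [pvFold_getD, pvSeed_getD, pvSet_update_empty]
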